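-- pv_equiv track=rewrite | github.com/TheMkrage/LAHacks-2020-Backend | app.py | get_vowels_and_cons
-- ===== SOURCE A (Python) =====
-- def get_vowels_and_cons(phonemes):
--     expected_vowels = 0
--     expected_cons = 0
--     is_last_vowel = False
--     for phoneme in phonemes:
--         if phoneme[0] in ['A', 'E', 'I', 'O', 'U']:
--             expected_vowels += 1
--             is_last_vowel = True
--         else:
--             if (is_last_vowel):
--                 expected_cons += 1
--             is_last_vowel = False
--     return expected_vowels, expected_cons
-- ===== SOURCE B (Python) =====
-- def get_vowels_and_cons(phonemes):
--     mask = [p[0] in ('A', 'E', 'I', 'O', 'U') for p in phonemes]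
--     expected_vowels = sum(mask)
--     expected_cons = sum(1 for prev, cur in zip(mask, mask[1:]) if prev and not cur)
--     return expected_vowels, expected_cons
-- ===== Notes on version B (the rewrite author's own statement) =====
-- stated objective: simpler
-- what changed: Replaces the stateful loop with an is_last_vowel flag by a boolean vowel mask built once, then a sum for the vowel count and a zip over adjacent mask pairs for the vowel-to-consonant transitions.
import Mathlib
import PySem

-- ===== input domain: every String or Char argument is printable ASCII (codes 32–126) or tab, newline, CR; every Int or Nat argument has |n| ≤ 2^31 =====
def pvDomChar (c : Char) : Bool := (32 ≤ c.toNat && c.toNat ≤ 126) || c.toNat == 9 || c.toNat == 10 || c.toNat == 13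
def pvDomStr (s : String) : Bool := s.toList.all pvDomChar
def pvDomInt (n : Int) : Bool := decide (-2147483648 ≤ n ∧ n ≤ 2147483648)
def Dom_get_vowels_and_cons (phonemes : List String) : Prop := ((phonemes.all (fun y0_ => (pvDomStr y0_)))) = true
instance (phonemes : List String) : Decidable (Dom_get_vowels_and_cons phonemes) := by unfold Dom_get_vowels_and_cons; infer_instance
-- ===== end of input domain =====

-- B replaces A's stateful loop by a vowel mask plus a sum and an adjacent-pair scan (objective: simpler).
-- Pre_ excludes lists containing an empty string, on which both programs raise IndexError at phoneme[0].

-- ===== PORT A =====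
def pvIsVowelChar (c : Char) : Bool :=
  c == 'A' || c == 'E' || c == 'I' || c == 'O' || c == 'U'

-- phoneme[0]; outside Pre_ (empty phoneme) Python raises, the default here is never claimed about
def pvFirst (p : String) : Char := (PySem.Str.pyGet? p 0).getD ' '

def pvAStep (st : Int × Int × Bool) (phoneme : String) : Int × Int × Bool :=
  if pvIsVowelChar (pvFirst phoneme) then
    (st.1 + 1, st.2.1, true)
  else
    (st.1, if st.2.2 then st.2.1 + 1 else st.2.1, false)

def get_vowels_and_cons (phonemes : List String) : Int × Int :=
  let r := phonemes.foldl pvAStep (0, 0, false)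
  (r.1, r.2.1)

-- ===== PORT B =====
def get_vowels_and_cons_alt (phonemes : List String) : Int × Int :=
  let mask := phonemes.map (fun p => pvIsVowelChar (pvFirst p))
  let expected_vowels : Int := (mask.filter (fun b => b)).length
  let expected_cons : Int :=
    ((mask.zip mask.tail).filter (fun q => q.1 && !q.2)).length
  (expected_vowels, expected_cons)

-- ===== PRECONDITION & SPEC =====
-- Pre_ excludes lists containing an empty string: there phoneme[0] raises IndexError in both A and B.
def Pre_get_vowels_and_cons (phonemes : List String) : Prop := "" ∉ phonemes
instance (phonemes : List String) : Decidable (Pre_get_vowels_and_cons phonemes) := by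
  unfold Pre_get_vowels_and_cons; infer_instance
def pvWitness_get_vowels_and_cons : List String := ["AH", "K", "IY"]

def Spec_get_vowels_and_cons (phonemes : List String) (out : Int × Int) : Prop := out = get_vowels_and_cons_alt phonemes
instance (phonemes : List String) (out : Int × Int) : Decidable (Spec_get_vowels_and_cons phonemes out) := by unfold Spec_get_vowels_and_cons; infer_instance

-- ===== CLAIM (what is proved, stated in full; the proofs are below) =====
def Claim_equal_get_vowels_and_cons : Prop := ∀ (phonemes : List String), Dom_get_vowels_and_cons phonemes → Pre_get_vowels_and_cons phonemes → Spec_get_vowels_and_cons phonemes (get_vowels_and_cons phonemes)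

-- ===== LEMMAS AND PROOFS =====

-- reference counts, used to relate the two ports
def pvVCount (l : List String) : Int :=
  match l with
  | [] => 0
  | p :: l => (if pvIsVowelChar (pvFirst p) then 1 else 0) + pvVCount l

def pvTCount (b : Bool) (l : List String) : Int :=
  match l with
  | [] => 0
  | p :: l => (if b && !pvIsVowelChar (pvFirst p) then 1 else 0)
              + pvTCount (pvIsVowelChar (pvFirst p)) l

theorem pvFoldA (l : List String) : ∀ (v c : Int) (b : Bool),
    l.foldl pvAStep (v, c, b) = (v + pvVCount l, c + pvTCount b l,
      l.foldl (fun s p => pvIsVowelChar (pvFirst p)) b) := by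
  induction l with
  | nil => intro v c b; simp [pvVCount, pvTCount]
  | cons p l ih =>
    intro v c b
    simp only [List.foldl, pvVCount, pvTCount]
    rw [pvAStep]
    by_cases h : pvIsVowelChar (pvFirst p) = true
    · simp [h, ih]; ring
    · simp only [Bool.not_eq_true] at h
      simp [h, ih]
      cases b <;> simp <;> ring

theorem pvVCountB (l : List Bool) (f : List String)
    (hm : l = f.map (fun p => pvIsVowelChar (pvFirst p))) :
    ((l.filter (fun b => b)).length : Int) = pvVCount f := by
  induction f generalizing l with
  | nil => subst hm; simp [pvVCount]
  | cons p f ih =>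
    subst hm
    simp only [List.map, List.filter, pvVCount]
    by_cases h : pvIsVowelChar (pvFirst p) = true
    · simp [h, ih _ rfl]; ring
    · simp only [Bool.not_eq_true] at h
      simp [h, ih _ rfl]

theorem pvTCountB (f : List String) : ∀ (x : Bool) (p0 : String),
    x = pvIsVowelChar (pvFirst p0) →
    ((((x :: f.map (fun p => pvIsVowelChar (pvFirst p))).zip
        (f.map (fun p => pvIsVowelChar (pvFirst p)))).filter
        (fun q => q.1 && !q.2)).length : Int) = pvTCount x f := by
  induction f with
  | nil => intro x p0 _; simp [pvTCount]
  | cons p f ih =>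
    intro x p0 _
    simp only [List.map, List.zip_cons_cons, List.filter, pvTCount]
    by_cases h : (x && !pvIsVowelChar (pvFirst p)) = true
    · simp [h, ih _ p rfl]; ring
    · simp only [Bool.not_eq_true] at h
      simp [h, ih _ p rfl]

theorem pvAB (phonemes : List String) :
    get_vowels_and_cons phonemes = get_vowels_and_cons_alt phonemes := by
  unfold get_vowels_and_cons get_vowels_and_cons_alt
  rw [pvFoldA]
  cases phonemes with
  | nil => simp [pvVCount, pvTCount]
  | cons p f =>
    simp only [List.map, List.tail]
    refine Prod.ext ?_ ?_
    · simpa using (pvVCountB _ (p :: f) rfl).symm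
    · simpa [pvTCount] using (pvTCountB f (pvIsVowelChar (pvFirst p)) p rfl).symm

-- ===== VERDICT (by name: the statement is the Claim_ definition above) =====
theorem get_vowels_and_cons_spec : Claim_equal_get_vowels_and_cons := by
  intro phonemes _ _
  unfold Spec_get_vowels_and_cons
  exact pvAB phonemes
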